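-- pv_equiv track=rewrite | github.com/Amo-Zeng/clinicaflow-medgemma | clinicaflow/agents.py | _patient_return_precautions
-- ===== SOURCE A (Python) =====
-- def _patient_return_precautions(red_flags: list[str]) -> list[str]:
--     # Generic safety net.
--     precautions: list[str] = [
--         "Trouble breathing, blue lips, or worsening shortness of breath",
--         "New chest pain/pressure, fainting, or severe sweating",
--         "New confusion, one-sided weakness, facial droop, or trouble speaking",
--         "Vomiting blood or black/bloody stools",
--         "Severe headache unlike usual, seizure, or neck stiffness",
--         "Pregnancy with bleeding, severe abdominal pain, or dizziness",
--         "Symptoms rapidly worsening or you feel unsafe at home",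
--     ]
--
--     # If we have explicit red flags, surface the most relevant ones first.
--     prioritized: list[str] = []
--     for flag in red_flags:
--         f = str(flag)
--         if "coronary" in f or "chest pain" in f:
--             prioritized.append("Chest pain/pressure, pain spreading to arm/jaw, or shortness of breath")
--         if "Respiratory compromise" in f or "oxygen" in f:
--             prioritized.append("Worsening shortness of breath, low oxygen readings, or trouble breathing")
--         if "stroke" in f or "intracranial" in f or "neurological" in f:
--             prioritized.append("New trouble speaking, facial droop, or weakness/numbness on one side")
--         if "Syncope" in f:
--             prioritized.append("Fainting, near-fainting, or severe dizziness")
--         if "gastrointestinal bleed" in f or "GI bleed" in f or "upper GI bleed" in f: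
--             prioritized.append("Vomiting blood or black/bloody stools")
--         if "obstetric" in f:
--             prioritized.append("Pregnancy with bleeding, severe abdominal pain, or dizziness")
--         if "fever" in f:
--             prioritized.append("High fever with confusion, rapid breathing, or worsening weakness")
--         if "Hypotension" in f:
--             prioritized.append("Feeling faint or unable to stay awake")
--
--     out = _dedupe(prioritized) + [x for x in precautions if x not in set(prioritized)]
--     return out[:7]
--
-- def _dedupe(items: list[str]) -> list[str]:
--     seen: set[str] = set()
--     out: list[str] = []
--     for item in items:
--         if item not in seen:
--             seen.add(item)
--             out.append(item)
--     return out
-- ===== SOURCE B (Python) =====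
-- # Different algorithm: instead of scanning the flags and appending (with
-- # duplicates) then deduping, scan the RULES: for each rule find the FIRST flag
-- # that triggers it (early break), bucket its message under that flag index, and
-- # concatenate the buckets.  No dedupe pass is needed because the eight rule
-- # messages are pairwise distinct; the result order (first-triggering-flag,
-- # then rule order) is exactly A's first-occurrence order.
--
-- _RULES = [
--     (("coronary", "chest pain"),
--      "Chest pain/pressure, pain spreading to arm/jaw, or shortness of breath"),
--     (("Respiratory compromise", "oxygen"),
--      "Worsening shortness of breath, low oxygen readings, or trouble breathing"),
--     (("stroke", "intracranial", "neurological"),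
--      "New trouble speaking, facial droop, or weakness/numbness on one side"),
--     (("Syncope",),
--      "Fainting, near-fainting, or severe dizziness"),
--     (("gastrointestinal bleed", "GI bleed", "upper GI bleed"),
--      "Vomiting blood or black/bloody stools"),
--     (("obstetric",),
--      "Pregnancy with bleeding, severe abdominal pain, or dizziness"),
--     (("fever",),
--      "High fever with confusion, rapid breathing, or worsening weakness"),
--     (("Hypotension",),
--      "Feeling faint or unable to stay awake"),
-- ]
--
-- _GENERIC = [
--     "Trouble breathing, blue lips, or worsening shortness of breath",
--     "New chest pain/pressure, fainting, or severe sweating",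
--     "New confusion, one-sided weakness, facial droop, or trouble speaking",
--     "Vomiting blood or black/bloody stools",
--     "Severe headache unlike usual, seizure, or neck stiffness",
--     "Pregnancy with bleeding, severe abdominal pain, or dizziness",
--     "Symptoms rapidly worsening or you feel unsafe at home",
-- ]
--
--
-- def _patient_return_precautions(red_flags: list[str]) -> list[str]:
--     flags = [str(f) for f in red_flags]
--     buckets: list[list[str]] = [[] for _ in flags]
--     for kws, msg in _RULES:
--         for i, f in enumerate(flags):
--             if any(kw in f for kw in kws):
--                 buckets[i].append(msg)
--                 break
--     prio = [m for b in buckets for m in b]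
--     hit = set(prio)
--     return (prio + [g for g in _GENERIC if g not in hit])[:7]
-- ===== Notes on version B (the rewrite author's own statement) =====
-- stated objective: alternative
-- what changed: A scans the flags, appends a message per firing branch (with duplicates) and then dedupes; B scans the rules instead, finds each rule's first triggering flag with an early break, buckets the message under that flag index and concatenates the buckets - no duplicates ever arise, so the dedupe pass disappears (correct because the eight rule messages are pairwise distinct, so A's first-occurrence order is exactly (first triggering flag, rule order)).
import Mathlib
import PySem

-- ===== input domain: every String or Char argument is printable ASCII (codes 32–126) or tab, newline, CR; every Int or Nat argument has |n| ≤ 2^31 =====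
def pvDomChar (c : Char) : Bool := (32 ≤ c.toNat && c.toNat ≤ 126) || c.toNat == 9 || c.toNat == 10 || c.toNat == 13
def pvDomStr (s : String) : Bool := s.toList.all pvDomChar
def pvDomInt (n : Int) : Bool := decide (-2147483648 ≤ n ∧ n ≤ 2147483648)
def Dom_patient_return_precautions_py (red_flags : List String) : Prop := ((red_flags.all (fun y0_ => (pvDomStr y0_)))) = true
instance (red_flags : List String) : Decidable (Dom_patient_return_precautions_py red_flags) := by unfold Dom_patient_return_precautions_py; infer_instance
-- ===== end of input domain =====

-- B scans the rules instead of the flags: each rule's message is bucketed under its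
-- first triggering flag (early break) and the buckets are concatenated, so A's
-- dedupe pass disappears (objective: alternative).

-- ===== PORT A =====
-- _dedupe: seen-set + output-list loop
def pvDedupe (items : List String) : List String :=
  (items.foldl
    (fun (st : PySem.Set String × List String) item =>
      if st.1.contains item then st else (st.1.add item, st.2 ++ [item]))
    (PySem.Set.empty, [])).2

def patient_return_precautions_py (red_flags : List String) : List String :=
  let precautions : List String :=
    [ "Trouble breathing, blue lips, or worsening shortness of breath",
      "New chest pain/pressure, fainting, or severe sweating",
      "New confusion, one-sided weakness, facial droop, or trouble speaking",
      "Vomiting blood or black/bloody stools",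
      "Severe headache unlike usual, seizure, or neck stiffness",
      "Pregnancy with bleeding, severe abdominal pain, or dizziness",
      "Symptoms rapidly worsening or you feel unsafe at home" ]
  let prioritized : List String :=
    red_flags.foldl
      (fun pr flag =>
        let f := flag  -- str(flag) on a str is the identity
        let pr := if PySem.Str.isIn "coronary" f || PySem.Str.isIn "chest pain" f then
            pr ++ ["Chest pain/pressure, pain spreading to arm/jaw, or shortness of breath"] else pr
        let pr := if PySem.Str.isIn "Respiratory compromise" f || PySem.Str.isIn "oxygen" f then
            pr ++ ["Worsening shortness of breath, low oxygen readings, or trouble breathing"] else pr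
        let pr := if PySem.Str.isIn "stroke" f || PySem.Str.isIn "intracranial" f || PySem.Str.isIn "neurological" f then
            pr ++ ["New trouble speaking, facial droop, or weakness/numbness on one side"] else pr
        let pr := if PySem.Str.isIn "Syncope" f then
            pr ++ ["Fainting, near-fainting, or severe dizziness"] else pr
        let pr := if PySem.Str.isIn "gastrointestinal bleed" f || PySem.Str.isIn "GI bleed" f || PySem.Str.isIn "upper GI bleed" f then
            pr ++ ["Vomiting blood or black/bloody stools"] else pr
        let pr := if PySem.Str.isIn "obstetric" f then
            pr ++ ["Pregnancy with bleeding, severe abdominal pain, or dizziness"] else pr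
        let pr := if PySem.Str.isIn "fever" f then
            pr ++ ["High fever with confusion, rapid breathing, or worsening weakness"] else pr
        let pr := if PySem.Str.isIn "Hypotension" f then
            pr ++ ["Feeling faint or unable to stay awake"] else pr
        pr)
      []
  let out := pvDedupe prioritized
    ++ precautions.filter (fun x => !((PySem.Set.ofList prioritized).contains x))
  PySem.List.slice out none (some 7)

-- ===== PORT B =====
def pvRules : List (List String × String) :=
  [ (["coronary", "chest pain"],
     "Chest pain/pressure, pain spreading to arm/jaw, or shortness of breath"),
    (["Respiratory compromise", "oxygen"],
     "Worsening shortness of breath, low oxygen readings, or trouble breathing"),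
    (["stroke", "intracranial", "neurological"],
     "New trouble speaking, facial droop, or weakness/numbness on one side"),
    (["Syncope"],
     "Fainting, near-fainting, or severe dizziness"),
    (["gastrointestinal bleed", "GI bleed", "upper GI bleed"],
     "Vomiting blood or black/bloody stools"),
    (["obstetric"],
     "Pregnancy with bleeding, severe abdominal pain, or dizziness"),
    (["fever"],
     "High fever with confusion, rapid breathing, or worsening weakness"),
    (["Hypotension"],
     "Feeling faint or unable to stay awake") ]

def pvGeneric : List String :=
  [ "Trouble breathing, blue lips, or worsening shortness of breath",
    "New chest pain/pressure, fainting, or severe sweating",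
    "New confusion, one-sided weakness, facial droop, or trouble speaking",
    "Vomiting blood or black/bloody stools",
    "Severe headache unlike usual, seizure, or neck stiffness",
    "Pregnancy with bleeding, severe abdominal pain, or dizziness",
    "Symptoms rapidly worsening or you feel unsafe at home" ]

-- inner 'for i, f in enumerate(flags): if any(...): ...; break'
def pvFindFirst (kws : List String) : Nat → List String → Option Nat
  | _, [] => none
  | i, f :: fs =>
      if kws.any (fun kw => PySem.Str.isIn kw f) then some i else pvFindFirst kws (i + 1) fs

-- buckets[i].append(msg)  (i is always a valid index when it is used)
def pvBucketAdd : Nat → String → List (List String) → List (List String)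
  | _, _, [] => []
  | 0, m, b :: bs => (b ++ [m]) :: bs
  | i + 1, m, b :: bs => b :: pvBucketAdd i m bs

def patient_return_precautions_py_alt (red_flags : List String) : List String :=
  let flags := red_flags  -- str(f) on a str is the identity
  let buckets :=
    pvRules.foldl
      (fun bs r =>
        match pvFindFirst r.1 0 flags with
        | some i => pvBucketAdd i r.2 bs
        | none => bs)
      (flags.map (fun _ => ([] : List String)))
  let prio := buckets.flatMap id
  let hit := PySem.Set.ofList prio
  PySem.List.slice (prio ++ pvGeneric.filter (fun g => !hit.contains g)) none (some 7)

-- ===== PRECONDITION & SPEC =====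
def Spec_patient_return_precautions_py (red_flags : List String) (out : List String) : Prop := out = patient_return_precautions_py_alt red_flags
instance (red_flags : List String) (out : List String) : Decidable (Spec_patient_return_precautions_py red_flags out) := by unfold Spec_patient_return_precautions_py; infer_instance

-- ===== CLAIM (what is proved, stated in full; the proofs are below) =====
def Claim_equal_patient_return_precautions_py : Prop := ∀ (red_flags : List String), Dom_patient_return_precautions_py red_flags → Spec_patient_return_precautions_py red_flags (patient_return_precautions_py red_flags)

-- ===== LEMMAS AND PROOFS =====

def pvMatch (f : String) (r : List String × String) : Bool :=
  r.1.any (fun kw => PySem.Str.isIn kw f)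

-- the messages a single flag contributes, in rule order
def pvSeg (R : List (List String × String)) (f : String) : List String :=
  (R.filter (pvMatch f)).map Prod.snd

-- reference form of B: peel flags off the front, removing already-fired rules
def pvAltCore : List (List String × String) → List String → List String
  | _, [] => []
  | R, f :: fs => pvSeg R f ++ pvAltCore (R.filter (fun r => !pvMatch f r)) fs

def pvFoldStep (fs : List String) (R : List (List String × String))
    (bs : List (List String)) : List (List String) :=
  R.foldl
    (fun bs r =>
      match pvFindFirst r.1 0 fs with
      | some i => pvBucketAdd i r.2 bs
      | none => bs)
    bs

-- B's dedup-free accumulation seen as A's dedupe loop with a general accumulator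
def pvNubFrom (acc : List String) (l : List String) : List String :=
  l.foldl (fun out msg => if out.contains msg then out else out ++ [msg]) acc

theorem pvFindFirst_shift (kws : List String) :
    ∀ (fs : List String) (i : Nat), pvFindFirst kws i fs = (pvFindFirst kws 0 fs).map (· + i) := by
  intro fs
  induction fs with
  | nil => intro i; rfl
  | cons f t ih =>
    intro i
    simp only [pvFindFirst]
    by_cases h : (kws.any fun kw => PySem.Str.isIn kw f) = true
    · rw [if_pos h, if_pos h]; simp
    · rw [if_neg h, if_neg h, ih (i + 1), ih 1]
      cases pvFindFirst kws 0 t <;> simp <;> omega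

theorem pvFoldStep_nil_flags : ∀ (R : List (List String × String)),
    pvFoldStep [] R [] = [] := by
  intro R
  induction R with
  | nil => rfl
  | cons r t ih => simpa [pvFoldStep, pvFindFirst] using ih

theorem pvFoldStep_cons (f : String) (fs : List String) :
    ∀ (R : List (List String × String)) (h : List String) (t : List (List String)),
      pvFoldStep (f :: fs) R (h :: t)
        = (h ++ pvSeg R f) :: pvFoldStep fs (R.filter (fun r => !pvMatch f r)) t := by
  intro R
  induction R with
  | nil => intro h t; simp [pvFoldStep, pvSeg]
  | cons r R' ih =>
    intro h t
    by_cases hm : pvMatch f r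
    · have h0 : pvFindFirst r.1 0 (f :: fs) = some 0 := by
        have hm' : (r.1.any fun kw => PySem.Str.isIn kw f) = true := hm
        simp only [pvFindFirst]
        rw [if_pos hm']
      have hstep : (match pvFindFirst r.1 0 (f :: fs) with
          | some i => pvBucketAdd i r.2 (h :: t)
          | none => h :: t) = (h ++ [r.2]) :: t := by
        rw [h0]
        rfl
      calc pvFoldStep (f :: fs) (r :: R') (h :: t)
          = pvFoldStep (f :: fs) R' ((h ++ [r.2]) :: t) := by
            simp only [pvFoldStep, List.foldl_cons, hstep]
        _ = ((h ++ [r.2]) ++ pvSeg R' f)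
              :: pvFoldStep fs (R'.filter (fun r => !pvMatch f r)) t := ih _ t
        _ = (h ++ pvSeg (r :: R') f)
              :: pvFoldStep fs ((r :: R').filter (fun r => !pvMatch f r)) t := by
            simp [pvSeg, hm]
    · have hnone : ¬ (r.1.any fun kw => PySem.Str.isIn kw f) = true := hm
      have hff : pvFindFirst r.1 0 (f :: fs) = (pvFindFirst r.1 0 fs).map (· + 1) := by
        simp only [pvFindFirst]
        rw [if_neg hnone]
        exact pvFindFirst_shift r.1 fs 1
      have hstep : (match pvFindFirst r.1 0 (f :: fs) with
          | some i => pvBucketAdd i r.2 (h :: t)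
          | none => h :: t)
          = h :: (match pvFindFirst r.1 0 fs with
            | some i => pvBucketAdd i r.2 t
            | none => t) := by
        rw [hff]
        cases pvFindFirst r.1 0 fs <;> simp [pvBucketAdd]
      calc pvFoldStep (f :: fs) (r :: R') (h :: t)
          = pvFoldStep (f :: fs) R'
              (h :: (match pvFindFirst r.1 0 fs with
                | some i => pvBucketAdd i r.2 t
                | none => t)) := by
            simp only [pvFoldStep, List.foldl_cons, hstep]
        _ = (h ++ pvSeg R' f) :: pvFoldStep fs (R'.filter (fun r => !pvMatch f r))
              (match pvFindFirst r.1 0 fs with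
                | some i => pvBucketAdd i r.2 t
                | none => t) := ih _ _
        _ = (h ++ pvSeg (r :: R') f)
              :: pvFoldStep fs ((r :: R').filter (fun r => !pvMatch f r)) t := by
            simp [pvSeg, hm, pvFoldStep, List.foldl_cons]

theorem pvFlatten_fold : ∀ (fs : List String) (R : List (List String × String)),
    (pvFoldStep fs R (fs.map (fun _ => ([] : List String)))).flatMap id = pvAltCore R fs := by
  intro fs
  induction fs with
  | nil => intro R; rw [show ([] : List String).map (fun _ => ([] : List String)) = [] from rfl,
      pvFoldStep_nil_flags]; rfl
  | cons f t ih =>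
    intro R
    rw [show (f :: t).map (fun _ => ([] : List String))
          = ([] : List String) :: t.map (fun _ => ([] : List String)) from rfl,
        pvFoldStep_cons]
    simp only [List.flatMap_cons, List.nil_append, id]
    rw [ih (R.filter (fun r => !pvMatch f r))]
    rfl

theorem pvNubFrom_append (acc l1 l2 : List String) :
    pvNubFrom acc (l1 ++ l2) = pvNubFrom (pvNubFrom acc l1) l2 := by
  simp [pvNubFrom, List.foldl_append]

-- On a duplicate-free list the dedup loop is just a filter against the accumulator.
theorem pvNubFrom_nodup (g : List String) (hg : g.Nodup) :
    ∀ acc, pvNubFrom acc g = acc ++ g.filter (fun x => !acc.contains x) := by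
  induction g with
  | nil => intro acc; simp [pvNubFrom]
  | cons a t ih =>
    intro acc
    have hat : a ∉ t := (List.nodup_cons.mp hg).1
    have ht : t.Nodup := (List.nodup_cons.mp hg).2
    simp only [pvNubFrom, List.foldl_cons]
    by_cases h : a ∈ acc
    · rw [if_pos (by simpa using h),
        show (t.foldl (fun out msg => if out.contains msg then out else out ++ [msg]) acc)
          = pvNubFrom acc t from rfl, ih ht acc]
      simp [h]
    · rw [if_neg (by simpa using h),
        show (t.foldl (fun out msg => if out.contains msg then out else out ++ [msg]) (acc ++ [a]))
          = pvNubFrom (acc ++ [a]) t from rfl, ih ht (acc ++ [a])]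
      have hf : t.filter (fun x => !(acc ++ [a]).contains x)
          = t.filter (fun x => !acc.contains x) := by
        apply List.filter_congr
        intro x hx
        have hxa : x ≠ a := fun he => hat (he ▸ hx)
        simp [hxa]
      rw [hf]
      simp [h]

-- elements already in the accumulator may be dropped from the input
theorem pvNubFrom_drop (p : String → Bool) :
    ∀ (l acc : List String), (∀ x, p x = true → x ∈ acc) →
      pvNubFrom acc l = pvNubFrom acc (l.filter (fun x => !p x)) := by
  intro l
  induction l with
  | nil => intro acc _; rfl
  | cons a t ih =>
    intro acc hacc
    by_cases hp : p a = true
    · have ha : a ∈ acc := hacc a hp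
      have hfa : (a :: t).filter (fun x => !p x) = t.filter (fun x => !p x) := by
        simp [hp]
      rw [hfa]
      simp only [pvNubFrom, List.foldl_cons]
      rw [if_pos (by simpa using ha)]
      exact ih acc hacc
    · have hpf : p a = false := by revert hp; cases p a <;> simp
      have hfa : (a :: t).filter (fun x => !p x) = a :: t.filter (fun x => !p x) := by
        simp [hpf]
      rw [hfa]
      simp only [pvNubFrom, List.foldl_cons]
      by_cases h : a ∈ acc
      · rw [if_pos (by simpa using h)]
        exact ih acc hacc
      · rw [if_neg (by simpa using h)]
        exact ih (acc ++ [a]) (fun x hx => List.mem_append_left _ (hacc x hx))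

theorem pvMem_nubFrom (x : String) :
    ∀ (l acc : List String), x ∈ pvNubFrom acc l ↔ x ∈ acc ∨ x ∈ l := by
  intro l
  induction l with
  | nil => intro acc; simp [pvNubFrom]
  | cons a t ih =>
    intro acc
    simp only [pvNubFrom, List.foldl_cons]
    by_cases h : a ∈ acc
    · rw [if_pos (by simpa using h)]
      rw [show (t.foldl (fun out msg => if out.contains msg then out else out ++ [msg]) acc)
            = pvNubFrom acc t from rfl, ih acc]
      constructor
      · rintro (h1 | h1) <;> simp_all
      · rintro (h1 | h1)
        · exact Or.inl h1
        · rcases List.mem_cons.mp h1 with he | ht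
          · exact Or.inl (he ▸ h)
          · exact Or.inr ht
    · rw [if_neg (by simpa using h)]
      rw [show (t.foldl (fun out msg => if out.contains msg then out else out ++ [msg]) (acc ++ [a]))
            = pvNubFrom (acc ++ [a]) t from rfl, ih (acc ++ [a])]
      simp only [List.mem_append, List.mem_cons]
      tauto

theorem pvSeg_nodup (R : List (List String × String)) (hR : (R.map Prod.snd).Nodup) (f : String) :
    (pvSeg R f).Nodup := by
  have hsub : ((R.filter (pvMatch f)).map Prod.snd).Sublist (R.map Prod.snd) :=
    List.Sublist.map Prod.snd List.filter_sublist
  exact hR.sublist hsub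

theorem pvMem_seg_iff (R : List (List String × String)) (hR : (R.map Prod.snd).Nodup)
    (f : String) (r : List String × String) (hr : r ∈ R) :
    r.2 ∈ pvSeg R f ↔ pvMatch f r = true := by
  constructor
  · intro h
    rcases List.mem_map.mp h with ⟨r', hr', he⟩
    rcases List.mem_filter.mp hr' with ⟨hr'R, hm'⟩
    have := List.inj_on_of_nodup_map hR hr'R hr he
    exact this ▸ hm'
  · intro h
    exact List.mem_map.mpr ⟨r, List.mem_filter.mpr ⟨hr, h⟩, rfl⟩

theorem pvSeg_filter (R : List (List String × String)) (hR : (R.map Prod.snd).Nodup)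
    (f g : String) :
    (pvSeg R g).filter (fun x => !(pvSeg R f).contains x)
      = pvSeg (R.filter (fun r => !pvMatch f r)) g := by
  unfold pvSeg
  rw [List.filter_map, List.filter_comm]
  congr 2
  apply List.filter_congr
  intro r hr
  have hc : ((R.filter (pvMatch f)).map Prod.snd).contains r.2 = pvMatch f r := by
    have hiff : r.2 ∈ (R.filter (pvMatch f)).map Prod.snd ↔ pvMatch f r = true := by
      simpa [pvSeg] using pvMem_seg_iff R hR f r hr
    by_cases hm : pvMatch f r = true
    · rw [hm, List.contains_iff_mem]
      simp [hiff.mpr hm]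
    · have hpf : pvMatch f r = false := by revert hm; cases pvMatch f r <;> simp
      rw [hpf]
      rw [Bool.eq_false_iff]
      intro hc2
      exact hm (hiff.mp (List.contains_iff_mem.mp hc2))
  show (!((R.filter (pvMatch f)).map Prod.snd).contains r.2) = !pvMatch f r
  rw [hc]

theorem pvFilter_flatMap_seg (R : List (List String × String)) (hR : (R.map Prod.snd).Nodup)
    (f : String) (fs : List String) :
    (fs.flatMap (pvSeg R)).filter (fun x => !(pvSeg R f).contains x)
      = fs.flatMap (pvSeg (R.filter (fun r => !pvMatch f r))) := by
  induction fs with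
  | nil => rfl
  | cons g t ih =>
    simp only [List.flatMap_cons, List.filter_append, ih, pvSeg_filter R hR f g]

-- the central invariant: A's dedupe of the flag-major stream equals B's rule-major core
theorem pvNub_flatMap : ∀ (fs : List String) (R : List (List String × String))
    (acc : List String), (R.map Prod.snd).Nodup → (∀ r ∈ R, r.2 ∉ acc) →
    pvNubFrom acc (fs.flatMap (pvSeg R)) = acc ++ pvAltCore R fs := by
  intro fs
  induction fs with
  | nil => intro R acc _ _; simp [pvNubFrom, pvAltCore]
  | cons f t ih =>
    intro R acc hR hacc
    have hsegnd := pvSeg_nodup R hR f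
    have hseg_acc : pvNubFrom acc (pvSeg R f) = acc ++ pvSeg R f := by
      rw [pvNubFrom_nodup _ hsegnd acc]
      congr 1
      apply List.filter_eq_self.mpr
      intro x hx
      rcases List.mem_map.mp hx with ⟨r, hr, he⟩
      have : r.2 ∉ acc := hacc r (List.mem_filter.mp hr).1
      simpa [he] using this
    rw [List.flatMap_cons, pvNubFrom_append, hseg_acc]
    rw [pvNubFrom_drop (fun x => (pvSeg R f).contains x) _ (acc ++ pvSeg R f)
        (fun x hx => List.mem_append_right _ (by simpa using hx))]
    rw [pvFilter_flatMap_seg R hR f t]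
    have hR' : (((R.filter (fun r => !pvMatch f r)).map Prod.snd)).Nodup :=
      hR.sublist (List.Sublist.map Prod.snd List.filter_sublist)
    have hacc' : ∀ r ∈ R.filter (fun r => !pvMatch f r), r.2 ∉ acc ++ pvSeg R f := by
      intro r hr
      rcases List.mem_filter.mp hr with ⟨hrR, hnm⟩
      intro hc
      rcases List.mem_append.mp hc with h1 | h1
      · exact hacc r hrR h1
      · have := (pvMem_seg_iff R hR f r hrR).mp h1
        simp [this] at hnm
    rw [ih _ _ hR' hacc', pvAltCore, List.append_assoc]

-- A's _dedupe equals the dedup loop (the seen set and the output list agree on membership).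
theorem pvDedupe_eq_pvNubFrom (items : List String) :
    pvDedupe items = pvNubFrom [] items := by
  suffices h : ∀ (seen : PySem.Set String) (out : List String),
      (∀ x, x ∈ seen ↔ x ∈ out) →
      (items.foldl
        (fun (st : PySem.Set String × List String) item =>
          if st.1.contains item then st else (st.1.add item, st.2 ++ [item]))
        (seen, out)).2 = pvNubFrom out items by
    exact h PySem.Set.empty [] (by intro x; simp [PySem.Set.empty])
  induction items with
  | nil => intro seen out _; simp [pvNubFrom]
  | cons a t ih =>
    intro seen out hinv
    simp only [List.foldl_cons, pvNubFrom]
    split_ifs with h1 h2 h2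
    · exact ih seen out hinv
    · exact absurd (by simpa using (hinv a).mp ((PySem.Set.contains_iff _ _).mp h1)) h2
    · exact absurd ((PySem.Set.contains_iff _ _).mpr ((hinv a).mpr (by simpa using h2))) h1
    · refine ih (seen.add a) (out ++ [a]) ?_
      intro x
      rw [PySem.Set.mem_add]
      simp only [List.mem_append, List.mem_singleton]
      rw [hinv x]

-- if-then-append pushed to an appended if (lines A's branch chain up with B's segments)
theorem pvIteAppend (c : Prop) [Decidable c] (pr : List String) (m : String) :
    (if c then pr ++ [m] else pr) = pr ++ (if c then [m] else []) := by
  split_ifs <;> simp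

theorem pvSegCons (r : List String × String) (rs : List (List String × String))
    (q : List String × String → Bool) :
    ((r :: rs).filter q).map (·.2) = (if q r then [r.2] else []) ++ (rs.filter q).map (·.2) := by
  by_cases h : q r <;> simp [h]

-- A's per-flag branch chain appends exactly the messages of B's matching rules.
theorem pvStep_eq (pr : List String) (f : String) :
    (let pr := if PySem.Str.isIn "coronary" f || PySem.Str.isIn "chest pain" f then
        pr ++ ["Chest pain/pressure, pain spreading to arm/jaw, or shortness of breath"] else pr
     let pr := if PySem.Str.isIn "Respiratory compromise" f || PySem.Str.isIn "oxygen" f then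
        pr ++ ["Worsening shortness of breath, low oxygen readings, or trouble breathing"] else pr
     let pr := if PySem.Str.isIn "stroke" f || PySem.Str.isIn "intracranial" f || PySem.Str.isIn "neurological" f then
        pr ++ ["New trouble speaking, facial droop, or weakness/numbness on one side"] else pr
     let pr := if PySem.Str.isIn "Syncope" f then
        pr ++ ["Fainting, near-fainting, or severe dizziness"] else pr
     let pr := if PySem.Str.isIn "gastrointestinal bleed" f || PySem.Str.isIn "GI bleed" f || PySem.Str.isIn "upper GI bleed" f then
        pr ++ ["Vomiting blood or black/bloody stools"] else pr
     let pr := if PySem.Str.isIn "obstetric" f then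
        pr ++ ["Pregnancy with bleeding, severe abdominal pain, or dizziness"] else pr
     let pr := if PySem.Str.isIn "fever" f then
        pr ++ ["High fever with confusion, rapid breathing, or worsening weakness"] else pr
     let pr := if PySem.Str.isIn "Hypotension" f then
        pr ++ ["Feeling faint or unable to stay awake"] else pr
     pr)
    = pr ++ pvSeg pvRules f := by
  simp only [pvSeg, pvMatch, pvRules, pvSegCons, List.filter_nil, List.map_nil, List.append_nil,
    List.any_cons, List.any_nil, Bool.or_false]
  simp only [pvIteAppend]
  simp [List.append_assoc, or_assoc]

theorem patient_return_precautions_py_spec : Claim_equal_patient_return_precautions_py := by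
  intro red_flags _
  unfold Spec_patient_return_precautions_py patient_return_precautions_py patient_return_precautions_py_alt
  dsimp only
  have hp : (red_flags.foldl
      (fun pr flag =>
        let f := flag
        let pr := if PySem.Str.isIn "coronary" f || PySem.Str.isIn "chest pain" f then
            pr ++ ["Chest pain/pressure, pain spreading to arm/jaw, or shortness of breath"] else pr
        let pr := if PySem.Str.isIn "Respiratory compromise" f || PySem.Str.isIn "oxygen" f then
            pr ++ ["Worsening shortness of breath, low oxygen readings, or trouble breathing"] else pr
        let pr := if PySem.Str.isIn "stroke" f || PySem.Str.isIn "intracranial" f || PySem.Str.isIn "neurological" f then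
            pr ++ ["New trouble speaking, facial droop, or weakness/numbness on one side"] else pr
        let pr := if PySem.Str.isIn "Syncope" f then
            pr ++ ["Fainting, near-fainting, or severe dizziness"] else pr
        let pr := if PySem.Str.isIn "gastrointestinal bleed" f || PySem.Str.isIn "GI bleed" f || PySem.Str.isIn "upper GI bleed" f then
            pr ++ ["Vomiting blood or black/bloody stools"] else pr
        let pr := if PySem.Str.isIn "obstetric" f then
            pr ++ ["Pregnancy with bleeding, severe abdominal pain, or dizziness"] else pr
        let pr := if PySem.Str.isIn "fever" f then
            pr ++ ["High fever with confusion, rapid breathing, or worsening weakness"] else pr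
        let pr := if PySem.Str.isIn "Hypotension" f then
            pr ++ ["Feeling faint or unable to stay awake"] else pr
        pr)
      []) = red_flags.flatMap (pvSeg pvRules) := by
    have hflat := PySem.List.foldl_append_eq_flatMap (pvSeg pvRules) red_flags []
    rw [List.nil_append] at hflat
    rw [← hflat]
    apply List.foldl_ext
    intro pr flag _
    exact pvStep_eq pr flag
  rw [hp]
  have hRnd : (pvRules.map Prod.snd).Nodup := by decide
  have hprio : pvDedupe (red_flags.flatMap (pvSeg pvRules)) = pvAltCore pvRules red_flags := by
    rw [pvDedupe_eq_pvNubFrom]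
    simpa using pvNub_flatMap red_flags pvRules [] hRnd (by simp)
  have hbuckets :
      (pvFoldStep red_flags pvRules (red_flags.map (fun _ => ([] : List String)))).flatMap id
        = pvAltCore pvRules red_flags := pvFlatten_fold red_flags pvRules
  rw [show (pvRules.foldl
        (fun bs r =>
          match pvFindFirst r.1 0 red_flags with
          | some i => pvBucketAdd i r.2 bs
          | none => bs)
        (red_flags.map (fun _ => ([] : List String))))
      = pvFoldStep red_flags pvRules (red_flags.map (fun _ => ([] : List String))) from rfl]
  rw [hbuckets, hprio]
  have hmem : ∀ x : String, x ∈ pvAltCore pvRules red_flags ↔ x ∈ red_flags.flatMap (pvSeg pvRules) := by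
    intro x
    rw [← hprio, pvDedupe_eq_pvNubFrom, pvMem_nubFrom]
    simp
  have hgen : pvGeneric.filter
        (fun x => !(PySem.Set.ofList (red_flags.flatMap (pvSeg pvRules))).contains x)
      = pvGeneric.filter
        (fun g => !(PySem.Set.ofList (pvAltCore pvRules red_flags)).contains g) := by
    apply List.filter_congr
    intro x _
    congr 1
    by_cases hx : x ∈ red_flags.flatMap (pvSeg pvRules)
    · rw [(PySem.Set.contains_iff _ _).mpr (by simpa [PySem.Set.mem_ofList] using hx),
          (PySem.Set.contains_iff _ _).mpr (by simpa [PySem.Set.mem_ofList] using (hmem x).mpr hx)]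
    · rw [Bool.eq_iff_iff]
      constructor
      · intro hc
        exact absurd (by simpa [PySem.Set.mem_ofList] using (PySem.Set.contains_iff _ _).mp hc) hx
      · intro hc
        exact absurd ((hmem x).mp
          (by simpa [PySem.Set.mem_ofList] using (PySem.Set.contains_iff _ _).mp hc)) hx
  show PySem.List.slice (pvAltCore pvRules red_flags ++ pvGeneric.filter
      (fun x => !(PySem.Set.ofList (red_flags.flatMap (pvSeg pvRules))).contains x)) none (some 7)
    = PySem.List.slice (pvAltCore pvRules red_flags ++ pvGeneric.filter
      (fun g => !(PySem.Set.ofList (pvAltCore pvRules red_flags)).contains g)) none (some 7)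
  rw [hgen]
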